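-- pv_equiv track=rewrite | github.com/Trilion-Automation-Suite/t.SicView | gomsic_core/parsers/network.py | _detect_column_positions
-- ===== SOURCE A (Python) =====
-- def _detect_column_positions(dash_line: str) -> list[tuple[int, int]]:
--     """Return ``[(start, end), ...]`` for each column from the dash underline.
--
--     The dash line looks like::
--
--         ---------                           --------- -------- ...
--
--     Each contiguous run of ``-`` characters marks a column.
--     """
--     positions: list[tuple[int, int]] = []
--     i = 0
--     n = len(dash_line)
--     while i < n:
--         if dash_line[i] == "-":
--             start = i
--             while i < n and dash_line[i] == "-":
--                 i += 1
--             positions.append((start, i))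
--         else:
--             i += 1
--     return positions
-- ===== SOURCE B (Python) =====
-- def _detect_column_positions(dash_line: str) -> list[tuple[int, int]]:
--     """Boundary detection: a column starts where a dash has no dash before it,
--     and ends just after a dash with no dash after it; zip the two lists."""
--     n = len(dash_line)
--     starts = [i for i in range(n)
--               if dash_line[i] == "-" and (i == 0 or dash_line[i - 1] != "-")]
--     ends = [i + 1 for i in range(n)
--             if dash_line[i] == "-" and (i == n - 1 or dash_line[i + 1] != "-")]
--     return list(zip(starts, ends))
-- ===== Notes on version B (the rewrite author's own statement) =====
-- stated objective: alternative
-- what changed: Replaced the stateful nested while-loop scan with boundary detection: run starts and run ends are computed by two independent comprehensions over range(n) and zipped into spans.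
import Mathlib
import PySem

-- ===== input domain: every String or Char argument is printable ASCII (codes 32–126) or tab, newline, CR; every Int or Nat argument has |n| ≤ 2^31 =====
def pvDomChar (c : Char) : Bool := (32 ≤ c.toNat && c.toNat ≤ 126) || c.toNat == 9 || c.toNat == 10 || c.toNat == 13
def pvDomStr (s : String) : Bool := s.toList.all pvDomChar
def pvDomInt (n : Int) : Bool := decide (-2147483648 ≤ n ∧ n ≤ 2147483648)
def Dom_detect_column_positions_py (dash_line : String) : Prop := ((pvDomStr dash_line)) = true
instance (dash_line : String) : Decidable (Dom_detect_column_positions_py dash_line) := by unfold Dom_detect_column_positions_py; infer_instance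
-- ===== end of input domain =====

-- B replaces A's stateful while-loop scan by boundary detection (two filters zipped); alternative decomposition, same cost.

-- ===== PORT A =====
-- inner `while i < n and dash_line[i] == "-": i += 1` — returns the final i
def pvInnerA (cs : List Char) (n i : Nat) : Nat :=
  if h : i < n ∧ cs.getD i ' ' = '-' then pvInnerA cs n (i + 1) else i
termination_by n - i
decreasing_by omega

-- pvInnerA only moves forward (cited by pvOuterA's termination proof)
theorem pvInnerA_ge (cs : List Char) (n i : Nat) : i ≤ pvInnerA cs n i := by
  fun_induction pvInnerA with
  | case1 i h ih => omega
  | case2 i h => omega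

theorem pvInnerA_gt (cs : List Char) (n i : Nat) (h1 : i < n) (h2 : cs.getD i ' ' = '-') :
    i < pvInnerA cs n i := by
  rw [pvInnerA, dif_pos ⟨h1, h2⟩]
  have := pvInnerA_ge cs n (i + 1)
  omega

-- outer while loop of A; state = (positions built so far is the returned list), index i
def pvOuterA (cs : List Char) (n i : Nat) : List (Int × Int) :=
  if h : i < n then
    if hd : cs.getD i ' ' = '-' then
      ((i : Int), (pvInnerA cs n i : Int)) :: pvOuterA cs n (pvInnerA cs n i)
    else
      pvOuterA cs n (i + 1)
  else []
termination_by n - i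
decreasing_by
  · have := pvInnerA_gt cs n i h hd; omega
  · omega

def detect_column_positions_py (dash_line : String) : List (Int × Int) :=
  pvOuterA dash_line.toList dash_line.toList.length 0

-- ===== PORT B =====
def detect_column_positions_py_alt (dash_line : String) : List (Int × Int) :=
  let s := dash_line.toList
  let n := s.length
  let starts : List Nat := (List.range n).filter
    (fun i => (s.getD i ' ' == '-') && (i == 0 || s.getD (i - 1) ' ' != '-'))
  let ends : List Nat := ((List.range n).filter
    (fun i => (s.getD i ' ' == '-') && (i == n - 1 || s.getD (i + 1) ' ' != '-'))).map (· + 1)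
  (starts.zip ends).map (fun p => ((p.1 : Int), (p.2 : Int)))

-- ===== PRECONDITION & SPEC =====
def Spec_detect_column_positions_py (dash_line : String) (out : List (Int × Int)) : Prop := out = detect_column_positions_py_alt dash_line
instance (dash_line : String) (out : List (Int × Int)) : Decidable (Spec_detect_column_positions_py dash_line out) := by unfold Spec_detect_column_positions_py; infer_instance

-- ===== CLAIM (what is proved, stated in full; the proofs are below) =====
def Claim_equal_detect_column_positions_py : Prop := ∀ (dash_line : String), Dom_detect_column_positions_py dash_line → Spec_detect_column_positions_py dash_line (detect_column_positions_py dash_line)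

-- ===== LEMMAS AND PROOFS =====

-- B's start predicate
def pvS (cs : List Char) (i : Nat) : Bool :=
  (cs.getD i ' ' == '-') && (i == 0 || cs.getD (i - 1) ' ' != '-')

-- B's end predicate
def pvE (cs : List Char) (n i : Nat) : Bool :=
  (cs.getD i ' ' == '-') && (i == n - 1 || cs.getD (i + 1) ' ' != '-')

theorem pvInnerA_le (cs : List Char) (n i : Nat) (hi : i ≤ n) : pvInnerA cs n i ≤ n := by
  fun_induction pvInnerA with
  | case1 i h ih => exact ih (by omega)
  | case2 i h => omega

theorem pvInnerA_run (cs : List Char) (n i : Nat) :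
    ∀ k, i ≤ k → k < pvInnerA cs n i → cs.getD k ' ' = '-' := by
  fun_induction pvInnerA with
  | case1 i h ih =>
    intro k hk1 hk2
    rcases Nat.eq_or_lt_of_le hk1 with rfl | hlt
    · exact h.2
    · exact ih k hlt hk2
  | case2 i h =>
    intro k hk1 hk2; omega

theorem pvInnerA_stop (cs : List Char) (n i : Nat) :
    ¬ (pvInnerA cs n i < n ∧ cs.getD (pvInnerA cs n i) ' ' = '-') := by
  fun_induction pvInnerA with
  | case1 i h ih => exact ih
  | case2 i h => exact h

-- a maximal dash run contributes exactly its first index to B's start filter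
theorem pvRunS (cs : List Char) (i m : Nat) (hm : 0 < m)
    (hrun : ∀ k, i ≤ k → k < i + m → cs.getD k ' ' = '-')
    (hstart : i = 0 ∨ cs.getD (i - 1) ' ' ≠ '-') :
    (List.range' i m).filter (pvS cs) = [i] := by
  obtain ⟨m', rfl⟩ : ∃ m', m = m' + 1 := ⟨m - 1, by omega⟩
  rw [List.range'_succ, List.filter_cons]
  have hi : pvS cs i = true := by
    simp only [pvS, Bool.and_eq_true, beq_iff_eq, Bool.or_eq_true, bne_iff_ne]
    refine ⟨hrun i le_rfl (by omega), ?_⟩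
    rcases hstart with h | h
    · exact Or.inl (by simp [h])
    · exact Or.inr h
  rw [if_pos hi]
  have : (List.range' (i + 1) m').filter (pvS cs) = [] := by
    rw [List.filter_eq_nil_iff]
    intro k hk
    rw [List.mem_range'_1] at hk
    simp only [pvS, Bool.and_eq_true, beq_iff_eq, Bool.or_eq_true, bne_iff_ne, not_and, not_or]
    intro _
    refine ⟨by omega, ?_⟩
    simp only [ne_eq, not_not]
    exact hrun (k - 1) (by omega) (by omega)
  rw [this]

-- a maximal dash run contributes exactly its last index to B's end filter
theorem pvRunE (cs : List Char) (n i m : Nat) (hm : 0 < m) (hle : i + m ≤ n)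
    (hrun : ∀ k, i ≤ k → k < i + m → cs.getD k ' ' = '-')
    (hstop : i + m = n ∨ cs.getD (i + m) ' ' ≠ '-') :
    (List.range' i m).filter (pvE cs n) = [i + m - 1] := by
  obtain ⟨m', rfl⟩ : ∃ m', m = m' + 1 := ⟨m - 1, by omega⟩
  rw [List.range'_concat, List.filter_append]
  have hfront : (List.range' i m').filter (pvE cs n) = [] := by
    rw [List.filter_eq_nil_iff]
    intro k hk
    rw [List.mem_range'_1] at hk
    simp only [pvE, Bool.and_eq_true, beq_iff_eq, Bool.or_eq_true, bne_iff_ne, not_and, not_or]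
    intro _
    refine ⟨by omega, ?_⟩
    simp only [ne_eq, not_not]
    exact hrun (k + 1) (by omega) (by omega)
  have hlast : pvE cs n (i + m') = true := by
    simp only [pvE, Bool.and_eq_true, beq_iff_eq, Bool.or_eq_true, bne_iff_ne]
    refine ⟨hrun (i + m') (by omega) (by omega), ?_⟩
    rcases hstop with h | h
    · exact Or.inl (by omega)
    · exact Or.inr h
  rw [hfront, List.filter_cons, show i + 1 * m' = i + m' from by omega, if_pos hlast,
      List.filter_nil, show i + (m' + 1) - 1 = i + m' from by omega, List.nil_append]

-- main invariant: from index i (just past a non-dash or a finished run, or 0),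
-- A's remaining loop output equals B's zipped filters restricted to [i, n)
theorem pvKey (cs : List Char) (n : Nat) (hn : cs.length = n) (i : Nat) (hi : i ≤ n)
    (inv : i = 0 ∨ cs.getD (i - 1) ' ' ≠ '-' ∨ cs.getD i ' ' ≠ '-') :
    pvOuterA cs n i =
      (((List.range' i (n - i)).filter (pvS cs)).zip
        ((((List.range' i (n - i)).filter (pvE cs n)).map (· + 1) : List Nat))).map
        (fun p => ((p.1 : Int), (p.2 : Int))) := by
  by_cases h : i < n
  · by_cases hd : cs.getD i ' ' = '-'
    · -- run case
      set j := pvInnerA cs n i with hj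
      have hij : i < j := pvInnerA_gt cs n i h hd
      have hjn : j ≤ n := pvInnerA_le cs n i hi
      have hrun : ∀ k, i ≤ k → k < i + (j - i) → cs.getD k ' ' = '-' := by
        intro k hk1 hk2; exact pvInnerA_run cs n i k hk1 (by omega)
      have hstop : i + (j - i) = n ∨ cs.getD (i + (j - i)) ' ' ≠ '-' := by
        have := pvInnerA_stop cs n i
        rw [← hj] at this
        have hij' : i + (j - i) = j := by omega
        rw [hij']
        by_cases hjn' : j < n
        · exact Or.inr (fun hc => this ⟨hjn', hc⟩)
        · exact Or.inl (by omega)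
      have hsplit : List.range' i (n - i) = List.range' i (j - i) ++ List.range' j (n - j) := by
        rw [show n - i = (j - i) + (n - j) by omega, ← List.range'_append,
            show i + 1 * (j - i) = j by omega]
      rw [hsplit, List.filter_append, List.filter_append,
          pvRunS cs i (j - i) (by omega) hrun
            (by rcases inv with h0 | h1 | h2
                · exact Or.inl h0
                · exact Or.inr h1
                · exact absurd hd h2),
          pvRunE cs n i (j - i) (by omega) (by omega) hrun hstop]
      have hrec : pvOuterA cs n j =
          (((List.range' j (n - j)).filter (pvS cs)).zip
            ((((List.range' j (n - j)).filter (pvE cs n)).map (· + 1) : List Nat))).map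
            (fun p => ((p.1 : Int), (p.2 : Int))) := by
        apply pvKey cs n hn j hjn
        rcases hstop with hs | hs
        · refine Or.inr (Or.inr ?_)
          have : i + (j - i) = j := by omega
          rw [this] at hs
          rw [hs, List.getD_eq_default]
          · simp
          · omega
        · refine Or.inr (Or.inr ?_)
          have : i + (j - i) = j := by omega
          rwa [this] at hs
      have hjj : j - 1 + 1 = j := by omega
      rw [pvOuterA, dif_pos h, dif_pos hd, ← hj, hrec,
          show i + (j - i) - 1 = j - 1 by omega]
      simp only [List.cons_append, List.nil_append, List.map_cons,
        List.zip_cons_cons, hjj]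
    · -- non-dash case
      have hsucc : List.range' i (n - i) = i :: List.range' (i + 1) (n - (i + 1)) := by
        rw [show n - i = (n - (i + 1)) + 1 by omega, List.range'_succ]
      have hSi : pvS cs i = false := by
        simp only [pvS, Bool.and_eq_false_iff, beq_eq_false_iff_ne]
        exact Or.inl hd
      have hEi : pvE cs n i = false := by
        simp only [pvE, Bool.and_eq_false_iff, beq_eq_false_iff_ne]
        exact Or.inl hd
      rw [pvOuterA, dif_pos h, dif_neg hd, hsucc, List.filter_cons, List.filter_cons,
          if_neg (by simp [hSi]), if_neg (by simp [hEi])]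
      exact pvKey cs n hn (i + 1) (by omega) (Or.inr (Or.inl hd))
  · have : i = n := by omega
    subst this
    rw [pvOuterA, dif_neg (by omega)]
    simp
termination_by n - i
decreasing_by
  · omega
  · omega

-- ===== VERDICT (by name: the statement is the Claim_ definition above) =====
theorem detect_column_positions_py_spec : Claim_equal_detect_column_positions_py := by
  intro s _
  show detect_column_positions_py s = detect_column_positions_py_alt s
  unfold detect_column_positions_py detect_column_positions_py_alt
  have := pvKey s.toList s.toList.length rfl 0 (Nat.zero_le _) (Or.inl rfl)
  simpa [List.range_eq_range', pvS, pvE] using this
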